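-- pv_equiv track=rewrite | github.com/PrinshiGuj/PreSecureScan-A | backend/scanner/compliance_checker.py | is_requirement_failed
-- ===== SOURCE A (Python) =====
-- def is_requirement_failed(requirement, vulnerabilities):
--     """Check if a compliance requirement is failed"""
--     # Simulated logic - in real implementation, map vulns to requirements
--     critical_vulns = sum(1 for v in vulnerabilities if v.get('severity') == 'Critical')
--     high_vulns = sum(1 for v in vulnerabilities if v.get('severity') == 'High')
--
--     if requirement['id'].startswith('GDPR'):
--         return critical_vulns > 0 or high_vulns > 2
--     elif requirement['id'].startswith('PCI'):
--         return critical_vulns > 0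
--     elif requirement['id'].startswith('HIPAA'):
--         return critical_vulns > 0 or high_vulns > 1
--
--     return False
-- ===== SOURCE B (Python) =====
-- _NEEDED_HIGHS = (('GDPR', 3), ('PCI', None), ('HIPAA', 2))
--
--
-- def _fails(vulns, need):
--     """Short-circuit search: True as soon as a Critical is seen, or as soon as
--     `need` High findings have been seen (need=None: Highs can never fail it)."""
--     if not vulns:
--         return False
--     s = vulns[0].get('severity')
--     if s == 'Critical':
--         return True
--     if s == 'High' and need is not None:
--         if need == 1:
--             return True
--         return _fails(vulns[1:], need - 1)
--     return _fails(vulns[1:], need)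
--
--
-- def is_requirement_failed(requirement, vulnerabilities):
--     """Check if a compliance requirement is failed (early-exit search, no counting)."""
--     rid = requirement['id']
--     for prefix, need in _NEEDED_HIGHS:
--         if rid.startswith(prefix):
--             return _fails(vulnerabilities, need)
--     return False
-- ===== Notes on version B (the rewrite author's own statement) =====
-- stated objective: alternative
-- what changed: B never counts severities: it turns each threshold into a 'High findings still needed to fail' budget and does one short-circuiting recursive search that returns True the moment a Critical is seen or the budget is exhausted, stopping early; A makes two full counting passes and compares counts to thresholds.
-- outside the precondition, e.g. on is_requirement_failed({'name': 'x'}, []): A raises KeyError, B raises KeyError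
import Mathlib
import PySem

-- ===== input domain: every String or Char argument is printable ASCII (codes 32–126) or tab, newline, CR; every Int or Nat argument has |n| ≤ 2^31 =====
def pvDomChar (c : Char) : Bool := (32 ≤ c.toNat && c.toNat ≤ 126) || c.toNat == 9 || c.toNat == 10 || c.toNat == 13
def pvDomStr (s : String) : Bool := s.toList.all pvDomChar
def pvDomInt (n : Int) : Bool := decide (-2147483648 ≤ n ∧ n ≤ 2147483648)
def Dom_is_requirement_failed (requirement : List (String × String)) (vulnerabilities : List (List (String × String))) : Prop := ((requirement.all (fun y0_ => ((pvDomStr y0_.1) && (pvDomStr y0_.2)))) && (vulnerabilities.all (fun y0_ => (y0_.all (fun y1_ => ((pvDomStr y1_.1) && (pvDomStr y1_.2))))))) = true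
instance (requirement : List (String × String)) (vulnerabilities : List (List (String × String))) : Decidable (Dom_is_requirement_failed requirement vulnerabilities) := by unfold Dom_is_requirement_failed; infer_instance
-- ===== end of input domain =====

-- B replaces A's count-then-compare (two full passes + if/elif thresholds) by a
-- short-circuiting recursive search with a decrementing 'Highs still needed to fail'
-- budget; it never computes any counts (alternative decomposition).

-- dict lookup on the association-list representation: first match (Python dict .get / [])
def pvDictGet? (d : List (String × String)) (k : String) : Option String :=
  (d.find? (fun p => p.1 == k)).map (·.2)

-- ===== PORT A =====
def is_requirement_failed (requirement : List (String × String)) (vulnerabilities : List (List (String × String))) : Bool :=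
  let critical_vulns : Int := vulnerabilities.foldl
    (fun acc v => if pvDictGet? v "severity" == some "Critical" then acc + 1 else acc) 0
  let high_vulns : Int := vulnerabilities.foldl
    (fun acc v => if pvDictGet? v "severity" == some "High" then acc + 1 else acc) 0
  match pvDictGet? requirement "id" with
  | none => false  -- KeyError in Python; excluded by Pre_
  | some rid =>
    if PySem.Str.startswith rid "GDPR" then critical_vulns > 0 || high_vulns > 2
    else if PySem.Str.startswith rid "PCI" then critical_vulns > 0
    else if PySem.Str.startswith rid "HIPAA" then critical_vulns > 0 || high_vulns > 1
    else false

-- ===== PORT B =====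
def pvNeededHighs : List (String × Option Int) := [("GDPR", some 3), ("PCI", none), ("HIPAA", some 2)]

-- _fails: early-exit search, True on the first Critical or when the High budget hits 1
def pvFails : List (List (String × String)) → Option Int → Bool
  | [], _ => false
  | v :: vs, need =>
    let s := pvDictGet? v "severity"
    if s == some "Critical" then true
    else if s == some "High" && need.isSome then
      if need == some 1 then true else pvFails vs (need.map (· - 1))
    else pvFails vs need

-- the 'for prefix, need in _NEEDED_HIGHS' loop with its early return
def pvRuleLoop (rid : String) (vulnerabilities : List (List (String × String))) :
    List (String × Option Int) → Bool
  | [] => false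
  | r :: rs =>
    if PySem.Str.startswith rid r.1 then pvFails vulnerabilities r.2
    else pvRuleLoop rid vulnerabilities rs

def is_requirement_failed_alt (requirement : List (String × String)) (vulnerabilities : List (List (String × String))) : Bool :=
  match pvDictGet? requirement "id" with
  | none => false  -- KeyError in Python; excluded by Pre_
  | some rid => pvRuleLoop rid vulnerabilities pvNeededHighs

-- ===== PRECONDITION & SPEC =====
-- Pre_ excludes exactly the inputs where requirement has no 'id' key: there Python A
-- (and B alike) raises KeyError.
def Pre_is_requirement_failed (requirement : List (String × String)) (_vulnerabilities : List (List (String × String))) : Prop :=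
  (pvDictGet? requirement "id").isSome = true
instance (requirement : List (String × String)) (vulnerabilities : List (List (String × String))) : Decidable (Pre_is_requirement_failed requirement vulnerabilities) := by unfold Pre_is_requirement_failed; infer_instance

def pvWitness_is_requirement_failed : (List (String × String)) × (List (List (String × String))) :=
  ([("id", "GDPR-1")], [[("severity", "High")]])

def Spec_is_requirement_failed (requirement : List (String × String)) (vulnerabilities : List (List (String × String))) (out : Bool) : Prop := out = is_requirement_failed_alt requirement vulnerabilities
instance (requirement : List (String × String)) (vulnerabilities : List (List (String × String))) (out : Bool) : Decidable (Spec_is_requirement_failed requirement vulnerabilities out) := by unfold Spec_is_requirement_failed; infer_instance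

-- ===== CLAIM (what is proved, stated in full; the proofs are below) =====
def Claim_equal_is_requirement_failed : Prop := ∀ (requirement : List (String × String)) (vulnerabilities : List (List (String × String))), Dom_is_requirement_failed requirement vulnerabilities → Pre_is_requirement_failed requirement vulnerabilities → Spec_is_requirement_failed requirement vulnerabilities (is_requirement_failed requirement vulnerabilities)

-- ===== LEMMAS AND PROOFS =====

-- A's counts, written recursively for the induction.
def pvCC : List (List (String × String)) → Int
  | [] => 0
  | v :: vs => (if pvDictGet? v "severity" == some "Critical" then 1 else 0) + pvCC vs

def pvHC : List (List (String × String)) → Int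
  | [] => 0
  | v :: vs => (if pvDictGet? v "severity" == some "High" then 1 else 0) + pvHC vs

lemma foldl_cc (vs : List (List (String × String))) (c : Int) :
    vs.foldl (fun acc v => if pvDictGet? v "severity" == some "Critical" then acc + 1 else acc) c
      = c + pvCC vs := by
  induction vs generalizing c with
  | nil => simp [pvCC]
  | cons v vs ih =>
    simp only [List.foldl_cons, pvCC, ih]
    split <;> ring

lemma foldl_hc (vs : List (List (String × String))) (c : Int) :
    vs.foldl (fun acc v => if pvDictGet? v "severity" == some "High" then acc + 1 else acc) c
      = c + pvHC vs := by
  induction vs generalizing c with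
  | nil => simp [pvHC]
  | cons v vs ih =>
    simp only [List.foldl_cons, pvHC, ih]
    split <;> ring

lemma cc_nonneg (vs : List (List (String × String))) : 0 ≤ pvCC vs := by
  induction vs with
  | nil => simp [pvCC]
  | cons v vs ih => simp only [pvCC]; split <;> omega

lemma hc_nonneg (vs : List (List (String × String))) : 0 ≤ pvHC vs := by
  induction vs with
  | nil => simp [pvHC]
  | cons v vs ih => simp only [pvHC]; split <;> omega

-- The early-exit search with a High budget of n decides 'some Critical, or ≥ n Highs'.
lemma fails_some (vs : List (List (String × String))) (n : Int) (hn : 1 ≤ n) :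
    pvFails vs (some n) = (decide (pvCC vs > 0) || decide (pvHC vs ≥ n)) := by
  induction vs generalizing n with
  | nil =>
    simp only [pvFails, pvCC, pvHC]
    have : ¬ ((0 : Int) ≥ n) := by omega
    simp [this]
  | cons v vs ih =>
    simp only [pvFails, pvCC, pvHC]
    by_cases hc : pvDictGet? v "severity" == some "Critical"
    · have h1 : (0:Int) < 1 + pvCC vs := by have := cc_nonneg vs; omega
      simp [hc, h1]
    · simp only [hc, Bool.false_eq_true, if_false]
      by_cases hh : pvDictGet? v "severity" == some "High"
      · simp only [hh, Option.isSome_some, Bool.and_self, if_true]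
        by_cases h1 : n = 1
        · subst h1
          have hhh : (1:Int) + pvHC vs ≥ 1 := by have := hc_nonneg vs; omega
          simp [hhh]
        · have hne : ((some n : Option Int) == some 1) = false := by
            simp [h1]
          have hnn : 1 ≤ n - 1 := by omega
          simp only [hne, Bool.false_eq_true, if_false, Option.map_some]
          rw [ih (n - 1) hnn]
          have : (pvHC vs ≥ n - 1) ↔ (1 + pvHC vs ≥ n) := by omega
          simp [hc, this]
      · simp only [hh, Bool.false_and, Bool.false_eq_true, if_false]
        rw [ih n hn]
        simp [hc, hh]

-- With no budget (PCI), the search decides 'some Critical'.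
lemma fails_none (vs : List (List (String × String))) :
    pvFails vs none = decide (pvCC vs > 0) := by
  induction vs with
  | nil => simp [pvFails, pvCC]
  | cons v vs ih =>
    simp only [pvFails, pvCC]
    by_cases hc : pvDictGet? v "severity" == some "Critical"
    · have h1 : (0:Int) < 1 + pvCC vs := by have := cc_nonneg vs; omega
      simp [hc, h1]
    · simp only [hc, Bool.false_eq_true, if_false, Option.isSome_none, Bool.and_false,
        if_false, ih]
      simp [hc]

-- ===== VERDICT (by name: the statement is the Claim_ definition above) =====
theorem is_requirement_failed_spec : Claim_equal_is_requirement_failed := by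
  intro requirement vulnerabilities _ _
  unfold Spec_is_requirement_failed is_requirement_failed is_requirement_failed_alt
  rcases hid : pvDictGet? requirement "id" with _ | rid
  · rfl
  · have e3 : decide (pvHC vulnerabilities ≥ 3) = decide (pvHC vulnerabilities > 2) :=
      decide_eq_decide.mpr (by omega)
    have e2 : decide (pvHC vulnerabilities ≥ 2) = decide (pvHC vulnerabilities > 1) :=
      decide_eq_decide.mpr (by omega)
    simp only [pvNeededHighs, pvRuleLoop, foldl_cc, foldl_hc, zero_add, fails_none,
      fails_some vulnerabilities 3 (by norm_num), fails_some vulnerabilities 2 (by norm_num),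
      e3, e2]
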